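-- pv_equiv track=rewrite | github.com/microsoft/muzic | relyme/telemelody_zh/infer.py | stage_2_get_b2t
-- ===== SOURCE A (Python) =====
-- def stage_2_get_b2t(lyrics, start_label, chord_pro):
--     """Get Beat2Trend
--
--     Args:
--         lyrics (string): lyrics
--         start_label (list): start beat of each word, range from 0 to 3
--         chord_pro (list): chord progression
--
--     Returns:
--         trend (list): (Beat, Chord, [Aut, Half, Not])
--         chords (list): chords of each bar
--     """
--
--     # get lyrics pattern
--     l_idx = 0
--     pattern = []  # split by '.', group L2B outputs into sentence pattern
--     cur_sent = [] # split by ','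
--     tmp_sent = []
--     for l in lyrics:
--         if l == ',':
--             cur_sent.append(tmp_sent)
--             tmp_sent = []
--
--         elif l in ['.', '?']:
--             cur_sent.append(tmp_sent)
--             pattern.append(cur_sent)
--             cur_sent = []
--             tmp_sent = []
--
--         else:
--             tmp_sent.append(start_label[l_idx])
--             l_idx += 1
--     # sent_pattern = adapt_b(sum(pattern, []))
--
--     # para_num = [ len(pat) for pat in pattern ]
--     # offset = 0
--     # new_pattern = []
--
--     # # ic(sent_pattern, para_num)
--     # for n in para_num:
--     #     new_pattern.append(list(sent_pattern[offset:offset+n]))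
--     #     offset += n
--
--     # pattern = new_pattern
--
--     word = ["MAJ"]
--     chords = []
--     cur_bar = 0
--     bar_num = len(chord_pro)
--     for sent in pattern:
--         for sect_idx, section in enumerate(sent):
--             next_bar = False
--             cur_chord = chord_pro[ cur_bar % bar_num ]
--             for idx, beat in enumerate(section):
--                 if next_bar:
--                     cur_bar += 1
--                     cur_chord = chord_pro[ cur_bar % bar_num ]
--                 next_bar = False
--                 word.append(f'Chord_{cur_chord}')
--                 chords.append(cur_chord)
--
--                 if idx != len(section) - 1:
--                     word.append('NOT')
--                     if section[idx] > section[idx + 1] or \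
--                         (idx > 0 and section[idx + 1] == section[idx - 1] == section[idx]):
--                         next_bar = True
--                 elif sect_idx == len(sent) - 1:
--                     word.append('AUT')
--                 else:
--                     word.append('HALF')
--
--                 word.append(f'BEAT_{beat}')
--             cur_bar += 1
--
--     trend = ' '.join(word)
--     return trend, chords
-- ===== SOURCE B (Python) =====
-- def _emit_section(section, last_sect, words, chords, cur_bar, chord_pro):
--     """Emit tokens for one section; returns the bar counter after the section."""
--     n = len(chord_pro)
--     rest = section
--     prev = None
--     while rest:
--         b, rest = rest[0], rest[1:]
--         cc = chord_pro[cur_bar % n]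
--         words.append('Chord_' + cc)
--         chords.append(cc)
--         if rest:
--             words.append('NOT')
--         elif last_sect:
--             words.append('AUT')
--         else:
--             words.append('HALF')
--         words.append('BEAT_%d' % b)
--         if rest and (b > rest[0] or (prev is not None and prev == b == rest[0])):
--             cur_bar += 1
--         prev = b
--     return cur_bar + 1
--
--
-- def stage_2_get_b2t(lyrics, start_label, chord_pro):
--     """Single fused pass: accumulate beats/sections while scanning the lyrics and
--     emit a whole sentence's tokens as soon as it is terminated by '.' or '?'."""
--     words = ["MAJ"]
--     chords = []
--     cur_bar = 0
--     l_idx = 0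
--     cur_sent = []   # finished sections of the current (open) sentence
--     tmp = []        # beats of the current (open) section
--     for ch in lyrics:
--         if ch == ',':
--             cur_sent.append(tmp)
--             tmp = []
--         elif ch == '.' or ch == '?':
--             cur_sent.append(tmp)
--             while cur_sent:
--                 section, cur_sent = cur_sent[0], cur_sent[1:]
--                 cur_bar = _emit_section(section, not cur_sent, words, chords, cur_bar, chord_pro)
--             tmp = []
--         else:
--             tmp.append(start_label[l_idx])
--             l_idx += 1
--     return ' '.join(words), chords
-- ===== Notes on version B (the rewrite author's own statement) =====
-- stated objective: alternative
-- what changed: B replaces A's two-phase design (build the whole nested sentence/section pattern, then nested indexed loops with a deferred next_bar flag) by one fused scan of the lyrics that emits each sentence's tokens as soon as its terminator is read, emitting a section by recursion on its beat list carrying the previous beat instead of index lookups.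
import Mathlib
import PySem

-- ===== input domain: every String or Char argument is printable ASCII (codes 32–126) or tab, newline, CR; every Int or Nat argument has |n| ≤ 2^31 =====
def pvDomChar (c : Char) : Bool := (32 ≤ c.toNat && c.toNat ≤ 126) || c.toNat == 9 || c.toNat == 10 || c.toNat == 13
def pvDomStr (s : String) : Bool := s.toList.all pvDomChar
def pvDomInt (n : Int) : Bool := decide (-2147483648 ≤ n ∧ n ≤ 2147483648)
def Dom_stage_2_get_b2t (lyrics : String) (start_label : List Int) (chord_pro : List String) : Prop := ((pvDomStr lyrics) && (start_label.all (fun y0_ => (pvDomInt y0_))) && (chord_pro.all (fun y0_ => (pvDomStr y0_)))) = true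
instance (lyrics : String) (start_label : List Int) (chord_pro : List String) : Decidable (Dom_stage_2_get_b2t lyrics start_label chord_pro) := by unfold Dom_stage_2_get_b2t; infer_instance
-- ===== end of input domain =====

-- B replaces A's two-phase design (build the full sentence/section pattern, then walk it)
-- with one fused scan of the lyrics that emits each sentence's tokens as soon as it is
-- terminated, and emits a section by recursion on its beat list carrying the previous beat
-- instead of A's index arithmetic with a deferred next_bar flag (objective: alternative).

-- chord_pro[cb % len(chord_pro)], guarded (the 0-length case is excluded by Pre_ wherever Python reaches it)
def pvChordAt (cp : List String) (cb : Nat) : String :=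
  if cp.length = 0 then "" else cp.getD (cb % cp.length) ""

-- ===== PORT A =====
-- phase 1 of A: split the lyrics into pattern / cur_sent / tmp_sent, consuming start_label
def pvBuildA (sl : List Int) : List Char → Nat × List (List (List Int)) × List (List Int) × List Int → Nat × List (List (List Int)) × List (List Int) × List Int
  | [], st => st
  | c :: rest, (li, pat, cs, ts) =>
    if c = ',' then pvBuildA sl rest (li, pat, cs ++ [ts], [])
    else if c = '.' ∨ c = '?' then pvBuildA sl rest (li, pat ++ [cs ++ [ts]], [], [])
    else pvBuildA sl rest (li + 1, pat, cs, ts ++ [sl.getD li 0])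

-- A's innermost loop: for idx, beat in enumerate(section), with the deferred next_bar flag
def pvInnerA (cp : List String) (s : List Int) (last : Bool) (idx : Nat)
    (w ch : List String) (cb : Nat) (cc : String) (nb : Bool) : List String × List String × Nat :=
  if _h : idx < s.length then
    let cb' := if nb then cb + 1 else cb
    let cc' := if nb then pvChordAt cp cb' else cc
    let w' := w ++ ["Chord_" ++ cc']
    let ch' := ch ++ [cc']
    let beat := s.getD idx 0
    if idx ≠ s.length - 1 then
      pvInnerA cp s last (idx + 1) (w' ++ ["NOT", "BEAT_" ++ PySem.Int.toStr beat]) ch' cb' cc'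
        (decide (s.getD (idx + 1) 0 < beat) ||
          (decide (0 < idx) && (s.getD (idx + 1) 0 == s.getD (idx - 1) 0) && (s.getD (idx - 1) 0 == beat)))
    else if last then
      pvInnerA cp s last (idx + 1) (w' ++ ["AUT", "BEAT_" ++ PySem.Int.toStr beat]) ch' cb' cc' false
    else
      pvInnerA cp s last (idx + 1) (w' ++ ["HALF", "BEAT_" ++ PySem.Int.toStr beat]) ch' cb' cc' false
  else (w, ch, cb)
termination_by s.length - idx

-- A's section loop over one sentence: enumerate(sent) with sect_idx, cur_bar += 1 per section
def pvSentA (cp : List String) : List (List Int) → Nat → Nat → List String × List String × Nat → List String × List String × Nat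
  | [], _, _, st => st
  | sec :: rest, si, total, (w, ch, cb) =>
    let r := pvInnerA cp sec (si == total - 1) 0 w ch cb (pvChordAt cp cb) false
    pvSentA cp rest (si + 1) total (r.1, r.2.1, r.2.2 + 1)

def stage_2_get_b2t (lyrics : String) (start_label : List Int) (chord_pro : List String) : String × List String :=
  let b := pvBuildA start_label lyrics.toList (0, [], [], [])
  let r := b.2.1.foldl (fun st sent => pvSentA chord_pro sent 0 sent.length st) (["MAJ"], [], 0)
  (PySem.Str.join " " r.1, r.2.1)

-- ===== PORT B =====
-- B's while-loop over a section's beats, carrying the previous beat; bar advance applied at once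
def pvEmitLoop (cp : List String) (last : Bool) : Option Int → List Int → List String → List String → Nat → List String × List String × Nat
  | _, [], w, ch, cb => (w, ch, cb)
  | prev, b :: rest, w, ch, cb =>
    let cc := pvChordAt cp cb
    let w' := w ++ ["Chord_" ++ cc] ++ [if rest ≠ [] then "NOT" else if last then "AUT" else "HALF"]
      ++ ["BEAT_" ++ PySem.Int.toStr b]
    let cb' := if rest ≠ [] ∧ (rest.headD 0 < b ∨ (prev = some b ∧ b = rest.headD 0)) then cb + 1 else cb
    pvEmitLoop cp last (some b) rest w' (ch ++ [cc]) cb'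

-- B's _emit_section: run the loop, return cur_bar + 1
def pvEmitSec (cp : List String) (sec : List Int) (last : Bool) : List String × List String × Nat → List String × List String × Nat
  | (w, ch, cb) =>
    let r := pvEmitLoop cp last none sec w ch cb
    (r.1, r.2.1, r.2.2 + 1)

-- B's 'while cur_sent:' drain of a terminated sentence
def pvSentsB (cp : List String) : List (List Int) → List String × List String × Nat → List String × List String × Nat
  | [], st => st
  | sec :: rest, st => pvSentsB cp rest (pvEmitSec cp sec rest.isEmpty st)

-- B's single fused pass over the lyrics
def pvRunB (sl : List Int) (cp : List String) : List Char → Nat × List (List Int) × List Int × (List String × List String × Nat) → Nat × List (List Int) × List Int × (List String × List String × Nat)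
  | [], st => st
  | c :: rest, (li, cs, ts, st) =>
    if c = ',' then pvRunB sl cp rest (li, cs ++ [ts], [], st)
    else if c = '.' ∨ c = '?' then pvRunB sl cp rest (li, [], [], pvSentsB cp (cs ++ [ts]) st)
    else pvRunB sl cp rest (li + 1, cs, ts ++ [sl.getD li 0], st)

def stage_2_get_b2t_alt (lyrics : String) (start_label : List Int) (chord_pro : List String) : String × List String :=
  let r := pvRunB start_label chord_pro lyrics.toList (0, [], [], (["MAJ"], [], 0))
  (PySem.Str.join " " r.2.2.2.1, r.2.2.2.2.1)

-- ===== PRECONDITION & SPEC =====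
-- Pre_ excludes exactly the inputs where Python A raises: an IndexError when the lyrics hold
-- more non-separator characters than start_label has entries, and a ZeroDivisionError when
-- chord_pro is empty while some sentence is terminated by '.'/'?'.
def Pre_stage_2_get_b2t (lyrics : String) (start_label : List Int) (chord_pro : List String) : Prop :=
  (lyrics.toList.countP (fun c => !(c == ',' || c == '.' || c == '?')) ≤ start_label.length) ∧
  (chord_pro ≠ [] ∨ ∀ c ∈ lyrics.toList, c ≠ '.' ∧ c ≠ '?')
instance (lyrics : String) (start_label : List Int) (chord_pro : List String) : Decidable (Pre_stage_2_get_b2t lyrics start_label chord_pro) := by unfold Pre_stage_2_get_b2t; infer_instance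

def pvWitness_stage_2_get_b2t : String × List Int × List String := ("ab,c.d?", [0, 1, 2, 3], ["C:maj", "G:maj"])

def Spec_stage_2_get_b2t (lyrics : String) (start_label : List Int) (chord_pro : List String) (out : String × List String) : Prop := out = stage_2_get_b2t_alt lyrics start_label chord_pro
instance (lyrics : String) (start_label : List Int) (chord_pro : List String) (out : String × List String) : Decidable (Spec_stage_2_get_b2t lyrics start_label chord_pro out) := by unfold Spec_stage_2_get_b2t; infer_instance

-- ===== CLAIM (what is proved, stated in full; the proofs are below) =====
def Claim_equal_stage_2_get_b2t : Prop := ∀ (lyrics : String) (start_label : List Int) (chord_pro : List String), Dom_stage_2_get_b2t lyrics start_label chord_pro → Pre_stage_2_get_b2t lyrics start_label chord_pro → Spec_stage_2_get_b2t lyrics start_label chord_pro (stage_2_get_b2t lyrics start_label chord_pro)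

-- ===== LEMMAS AND PROOFS =====

-- A's indexed inner loop with deferred next_bar equals B's previous-beat recursion on the suffix.
lemma pv_inner_eq (cp : List String) (last : Bool) (s : List Int) :
    ∀ k idx w ch cb cc nb,
      s.length - idx ≤ k →
      (nb = true → idx < s.length) →
      (nb = false → cc = pvChordAt cp cb) →
      pvInnerA cp s last idx w ch cb cc nb =
        pvEmitLoop cp last (if idx = 0 then none else some (s.getD (idx - 1) 0)) (s.drop idx)
          w ch (if nb then cb + 1 else cb) := by
  intro k
  induction k with
  | zero =>
    intro idx w ch cb cc nb hk hnb hcc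
    have hlen : ¬ idx < s.length := by omega
    have hnb' : nb = false := by
      cases nb
      · rfl
      · exact absurd (hnb rfl) hlen
    subst hnb'
    rw [pvInnerA, dif_neg hlen, List.drop_eq_nil_iff.mpr (by omega)]
    rfl
  | succ k ih =>
    intro idx w ch cb cc nb hk hnb hcc
    by_cases hlen : idx < s.length
    · rw [pvInnerA, dif_pos hlen, List.drop_eq_getElem_cons hlen,
        show (s[idx] : Int) = s.getD idx 0 from (List.getD_eq_getElem s 0 hlen).symm]
      have hcc' : (if nb = true then pvChordAt cp (if nb = true then cb + 1 else cb) else cc)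
          = pvChordAt cp (if nb = true then cb + 1 else cb) := by
        cases nb
        · exact hcc rfl
        · rfl
      simp only [hcc']
      generalize (if nb = true then cb + 1 else cb) = m
      rw [pvEmitLoop]
      by_cases hlast : idx = s.length - 1
      · have hdrop : s.drop (idx + 1) = [] := List.drop_eq_nil_iff.mpr (by omega)
        rw [if_neg (by omega), hdrop]
        cases last
        · simp only [Bool.false_eq_true, if_false]
          rw [ih (idx + 1) _ _ m (pvChordAt cp m) false (by omega) (by simp) (fun _ => rfl),
            List.drop_eq_nil_iff.mpr (by omega : s.length ≤ idx + 1)]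
          simp [pvEmitLoop]
        · rw [ih (idx + 1) _ _ m (pvChordAt cp m) false (by omega) (by simp) (fun _ => rfl),
            List.drop_eq_nil_iff.mpr (by omega : s.length ≤ idx + 1)]
          simp [pvEmitLoop]
      · have hnext : idx + 1 < s.length := by omega
        have hrest : s.drop (idx + 1) ≠ [] := by
          rw [Ne, List.drop_eq_nil_iff]; omega
        have hhd : (s.drop (idx + 1)).headD 0 = s.getD (idx + 1) 0 := by
          rw [List.drop_eq_getElem_cons hnext, List.getD_eq_getElem s 0 hnext]; rfl
        rw [if_pos hlast,
          ih (idx + 1) _ _ m _ _ (by omega) (fun _ => hnext) (fun _ => rfl)]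
        have hifb : (if s.drop (idx + 1) ≠ [] ∧ ((s.drop (idx + 1)).headD 0 < s.getD idx 0 ∨
              ((if idx = 0 then none else some (s.getD (idx - 1) 0)) = some (s.getD idx 0) ∧
                s.getD idx 0 = (s.drop (idx + 1)).headD 0)) then m + 1 else m)
            = (if (decide (s.getD (idx + 1) 0 < s.getD idx 0) ||
                decide (0 < idx) && (s.getD (idx + 1) 0 == s.getD (idx - 1) 0) &&
                  (s.getD (idx - 1) 0 == s.getD idx 0)) = true then m + 1 else m) := by
          rw [hhd]
          by_cases h0 : idx = 0
          · have ht : ¬ s.tail = [] := by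
              simpa [h0, List.drop_one] using hrest
            simp [h0, ht]
          · simp only [if_neg h0]
            split_ifs with h1 h2 h3
            · rfl
            · exfalso
              obtain ⟨-, h1⟩ := h1
              simp only [Option.some.injEq] at h1
              simp only [Bool.or_eq_true, Bool.and_eq_true, decide_eq_true_iff,
                beq_iff_eq, not_or, not_and] at h2
              obtain ⟨h2a, h2b⟩ := h2
              rcases h1 with h | ⟨ha, hb⟩
              · exact h2a h
              · have := h2b (by omega) (by omega)
                omega
            · exfalso
              simp only [Bool.or_eq_true, Bool.and_eq_true, decide_eq_true_iff, beq_iff_eq] at h3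
              rcases h3 with h | hh
              · exact h1 ⟨hrest, Or.inl h⟩
              · obtain ⟨⟨hpos, ha⟩, hb⟩ := hh
                exact h1 ⟨hrest, Or.inr ⟨congrArg some hb, by omega⟩⟩
            · rfl
        simp only [hifb, if_pos hrest]
        simp [List.append_assoc]
    · have hnb' : nb = false := by
        cases nb
        · rfl
        · exact absurd (hnb rfl) hlen
      subst hnb'
      rw [pvInnerA, dif_neg hlen, List.drop_eq_nil_iff.mpr (by omega)]
      rfl

-- A's enumerate-with-total section loop equals B's rest-is-empty recursion.
lemma pv_sent_eq (cp : List String) :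
    ∀ (r : List (List Int)) (si total : Nat) (st : List String × List String × Nat),
      si + r.length = total → pvSentA cp r si total st = pvSentsB cp r st := by
  intro r
  induction r with
  | nil => intro si total st _; rfl
  | cons sec rest ih =>
    intro si total st h
    obtain ⟨w, ch, cb⟩ := st
    have hflag : (si == total - 1) = rest.isEmpty := by
      cases rest with
      | nil => simp at h ⊢; omega
      | cons a b =>
        have : si ≠ total - 1 := by simp at h; omega
        simp [this]
    simp only [pvSentA, pvSentsB, pvEmitSec, hflag]
    rw [pv_inner_eq cp rest.isEmpty sec sec.length 0 w ch cb (pvChordAt cp cb) false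
      (by omega) (by simp) (fun _ => rfl)]
    simp only [List.drop_zero, Bool.false_eq_true, if_false]
    exact ih (si + 1) total _ (by simp at h ⊢; omega)

-- A's phase 1 accumulates the pattern as a prefix.
lemma pv_build_prefix (sl : List Int) :
    ∀ (chars : List Char) li p cs ts,
      pvBuildA sl chars (li, p, cs, ts) =
        (let r := pvBuildA sl chars (li, [], cs, ts); (r.1, p ++ r.2.1, r.2.2.1, r.2.2.2)) := by
  intro chars
  induction chars with
  | nil => intro li p cs ts; simp [pvBuildA]
  | cons c rest ih =>
    intro li p cs ts
    simp only [pvBuildA]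
    split_ifs with h1 h2
    · exact ih li p (cs ++ [ts]) []
    · rw [ih li (p ++ [cs ++ [ts]]) [] [], ih li ([] ++ [cs ++ [ts]]) [] []]
      simp
    · exact ih (li + 1) p cs (ts ++ [sl.getD li 0])

-- fusion: B's single pass equals A's build-then-fold.
lemma pv_fuse (sl : List Int) (cp : List String) :
    ∀ (chars : List Char) li cs ts st,
      pvRunB sl cp chars (li, cs, ts, st) =
        (let r := pvBuildA sl chars (li, [], cs, ts);
         (r.1, r.2.2.1, r.2.2.2, (r.2.1).foldl (fun s sent => pvSentsB cp sent s) st)) := by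
  intro chars
  induction chars with
  | nil => intro li cs ts st; simp [pvRunB, pvBuildA]
  | cons c rest ih =>
    intro li cs ts st
    simp only [pvRunB, pvBuildA]
    split_ifs with h1 h2
    · exact ih li (cs ++ [ts]) [] st
    · rw [ih li [] [] (pvSentsB cp (cs ++ [ts]) st),
        pv_build_prefix sl rest li ([] ++ [cs ++ [ts]]) [] []]
      simp
    · exact ih (li + 1) cs (ts ++ [sl.getD li 0]) st

-- ===== VERDICT (by name: the statement is the Claim_ definition above) =====
theorem stage_2_get_b2t_spec : Claim_equal_stage_2_get_b2t := by
  intro lyrics sl cp _ _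
  unfold Spec_stage_2_get_b2t stage_2_get_b2t stage_2_get_b2t_alt
  have hf : (fun st sent => pvSentA cp sent 0 sent.length st)
      = (fun (st : List String × List String × Nat) sent => pvSentsB cp sent st) := by
    funext st sent
    exact pv_sent_eq cp sent 0 sent.length st (by omega)
  rw [hf, pv_fuse sl cp lyrics.toList 0 [] [] (["MAJ"], [], 0)]
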